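-- pv_equiv track=rewrite | github.com/24Dscript/CS_comment_translator | CS_comment_translator.py | receaveSpaceSlash
-- ===== SOURCE A (Python) =====
-- def receaveSpaceSlash(textLine):
--     """
--     行の先頭のスペースと'/'を調べてその部分の内容を返す関数
--     Args:line: 1行の文字列
--     Returns:str: 先頭部分のスペースと'/'だけを含む部分の文字列
--     """
--     temp = ""
--     for char in textLine:
--         if char == ' ' or char == '/':
--             temp += char
--         else:
--             break
--     return temp
-- ===== SOURCE B (Python) =====
-- import re
--
-- def receaveSpaceSlash(textLine):
--     return re.match(r'[ /]*', textLine).group()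
-- ===== Notes on version B (the rewrite author's own statement) =====
-- stated objective: idiomatic
-- what changed: Replaced the manual character-by-character accumulate-and-break loop with a single anchored regex match of the prefix character class [ /]*.
import Mathlib
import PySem

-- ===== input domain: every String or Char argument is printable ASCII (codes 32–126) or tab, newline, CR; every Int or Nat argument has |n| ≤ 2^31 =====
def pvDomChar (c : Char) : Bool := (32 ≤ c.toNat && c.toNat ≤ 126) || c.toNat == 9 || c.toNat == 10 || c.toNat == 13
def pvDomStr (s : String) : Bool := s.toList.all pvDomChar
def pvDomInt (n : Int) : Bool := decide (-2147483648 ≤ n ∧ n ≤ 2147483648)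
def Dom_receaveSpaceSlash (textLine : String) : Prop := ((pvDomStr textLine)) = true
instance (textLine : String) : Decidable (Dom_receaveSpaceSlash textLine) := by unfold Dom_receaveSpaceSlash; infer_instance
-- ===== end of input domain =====

-- B replaces A's accumulate-and-break loop with an anchored prefix match ([ /]* ≙ takeWhile); return value only.

-- ===== PORT A =====
-- A's loop with break: recurse over the characters, appending to the accumulator, stopping at the first non-match.
def receaveSpaceSlashLoop (chars : List Char) (temp : String) : String :=
  match chars with
  | [] => temp
  | c :: rest => if c = ' ' ∨ c = '/' then receaveSpaceSlashLoop rest (temp.push c) else temp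

def receaveSpaceSlash (textLine : String) : String :=
  receaveSpaceSlashLoop textLine.toList ""

-- ===== PORT B =====
-- re.match(r'[ /]*', textLine).group(): the maximal prefix of characters in the class [ /].
def receaveSpaceSlash_alt (textLine : String) : String :=
  String.ofList (textLine.toList.takeWhile (fun c => c = ' ' || c = '/'))

-- ===== PRECONDITION & SPEC =====
def Spec_receaveSpaceSlash (textLine : String) (out : String) : Prop := out = receaveSpaceSlash_alt textLine
instance (textLine : String) (out : String) : Decidable (Spec_receaveSpaceSlash textLine out) := by unfold Spec_receaveSpaceSlash; infer_instance

-- ===== CLAIM (what is proved, stated in full; the proofs are below) =====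
def Claim_equal_receaveSpaceSlash : Prop := ∀ (textLine : String), Dom_receaveSpaceSlash textLine → Spec_receaveSpaceSlash textLine (receaveSpaceSlash textLine)

-- ===== LEMMAS AND PROOFS =====
theorem receaveSpaceSlashLoop_toList (chars : List Char) (temp : String) :
    (receaveSpaceSlashLoop chars temp).toList =
      temp.toList ++ chars.takeWhile (fun c => c = ' ' || c = '/') := by
  induction chars generalizing temp with
  | nil => simp [receaveSpaceSlashLoop]
  | cons c rest ih =>
    simp only [receaveSpaceSlashLoop, List.takeWhile]
    by_cases h : c = ' ' ∨ c = '/'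
    · have hb : (decide (c = ' ') || decide (c = '/')) = true := by
        rcases h with h | h <;> simp [h]
      rw [if_pos h, hb, ih]
      simp
    · have hb : (decide (c = ' ') || decide (c = '/')) = false := by
        simp only [Bool.or_eq_false_iff, decide_eq_false_iff_not]
        exact ⟨fun h1 => h (Or.inl h1), fun h2 => h (Or.inr h2)⟩
      rw [if_neg h, hb]
      simp

-- ===== VERDICT (by name: the statement is the Claim_ definition above) =====
theorem receaveSpaceSlash_spec : Claim_equal_receaveSpaceSlash := by
  intro textLine _
  unfold Spec_receaveSpaceSlash receaveSpaceSlash receaveSpaceSlash_alt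
  apply String.toList_inj.mp
  rw [receaveSpaceSlashLoop_toList]
  simp
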